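-- pv_equiv track=rewrite | github.com/kanselarij-vlaanderen/digital-signing-service | lib/prepare_signing_flow.py | group_by_meeting_or_decision_activity
-- ===== SOURCE A (Python) =====
-- from itertools import groupby
-- from typing import Dict, List, Callable
--
-- def group_by_meeting_or_decision_activity(sign_flows: List[Dict]):
--     get_meeting = lambda d: d.get("meeting", "")
--     get_decision_activity = lambda d: d.get("decision_activity", "")
--
--     grouped_flows = []
--
--     grouped_by_meeting = [
--         (meeting, list(group))
--         for meeting, group in groupby(sorted(sign_flows, key=get_meeting), get_meeting)
--     ]
--
--     for meeting, group in grouped_by_meeting: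
--         if meeting != "":
--             grouped_flows.append(group)
--         else:
--             grouped_flows.extend(
--                 [
--                     list(g)
--                     for _, g in groupby(
--                         sorted(group, key=get_decision_activity), get_decision_activity
--                     )
--                 ]
--             )
--
--     return grouped_flows
-- ===== SOURCE B (Python) =====
-- def group_by_meeting_or_decision_activity(sign_flows):
--     def buckets(flows, attr):
--         groups = {}
--         for d in flows:
--             groups.setdefault(d.get(attr, ""), []).append(d)
--         return groups
--
--     by_meeting = buckets(sign_flows, "meeting")
--     grouped_flows = []
--     for meeting in sorted(by_meeting):
--         if meeting != "":
--             grouped_flows.append(by_meeting[meeting])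
--         else:
--             by_activity = buckets(by_meeting[""], "decision_activity")
--             for activity in sorted(by_activity):
--                 grouped_flows.append(by_activity[activity])
--     return grouped_flows
-- ===== Notes on version B (the rewrite author's own statement) =====
-- stated objective: alternative
-- what changed: B replaces A's stable-sort-then-itertools.groupby (at both the meeting and the decision_activity level) with a single linear dict-bucketing pass per level (setdefault/append) followed by a sort of the distinct keys only; dict insertion order supplies the within-group order that A gets from sort stability.
import Mathlib
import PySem

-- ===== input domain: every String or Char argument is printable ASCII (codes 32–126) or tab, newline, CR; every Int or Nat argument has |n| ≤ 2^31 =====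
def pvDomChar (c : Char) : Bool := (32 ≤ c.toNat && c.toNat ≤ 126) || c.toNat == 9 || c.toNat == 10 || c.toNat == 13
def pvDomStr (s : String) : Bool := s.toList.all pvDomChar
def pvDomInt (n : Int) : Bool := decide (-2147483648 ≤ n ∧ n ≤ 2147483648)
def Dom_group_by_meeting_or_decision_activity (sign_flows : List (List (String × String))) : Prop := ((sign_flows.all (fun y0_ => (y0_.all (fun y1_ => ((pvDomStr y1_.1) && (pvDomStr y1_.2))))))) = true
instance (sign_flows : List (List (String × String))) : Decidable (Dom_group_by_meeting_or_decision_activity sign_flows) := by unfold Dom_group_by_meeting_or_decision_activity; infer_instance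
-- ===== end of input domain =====

-- B replaces A's sort-the-flows-then-groupby with one linear dict-bucketing pass per level
-- plus a sort of the distinct keys only (objective: alternative; same observable result).

-- d.get(attr, "") — first-match lookup in the association list, Python dict semantics
def pvGet (d : List (String × String)) (attr : String) : String :=
  (PySem.Dict.mk d).getD attr ""

-- ===== PORT A =====
-- itertools.groupby(l, f) materialised as (key, list(group)) pairs: consecutive runs of equal keys
def pvGroupby {α : Type} (f : α → String) : List α → List (String × List α)
  | [] => []
  | x :: xs =>
    (f x, x :: xs.takeWhile (fun y => f y == f x)) :: pvGroupby f (xs.dropWhile (fun y => f y == f x))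
  termination_by l => l.length
  decreasing_by
    simpa using Nat.lt_succ_of_le (List.length_dropWhile_le _ _)

def group_by_meeting_or_decision_activity (sign_flows : List (List (String × String))) : List (List (List (String × String))) :=
  (pvGroupby (fun d => pvGet d "meeting")
      (PySem.List.sorted sign_flows (fun d => pvGet d "meeting") false)).foldl
    (fun grouped_flows mg =>
      if mg.1 ≠ "" then grouped_flows ++ [mg.2]
      else grouped_flows ++
        (pvGroupby (fun d => pvGet d "decision_activity")
            (PySem.List.sorted mg.2 (fun d => pvGet d "decision_activity") false)).map (fun g => g.2))
    []

-- ===== PORT B =====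
-- one pass: groups.setdefault(d.get(attr, ""), []).append(d)
def pvBuckets (flows : List (List (String × String))) (attr : String) :
    PySem.Dict String (List (List (String × String))) :=
  flows.foldl (fun groups d => groups.modify (pvGet d attr) [] (fun g => g ++ [d])) PySem.Dict.empty

-- by_meeting[meeting] / by_activity[activity]: the key is always present (it comes from .keys),
-- so Python's d[k] is rendered by the total getD with default []
def group_by_meeting_or_decision_activity_alt (sign_flows : List (List (String × String))) : List (List (List (String × String))) :=
  (PySem.List.sorted (pvBuckets sign_flows "meeting").keys (fun k => k) false).foldl
    (fun grouped_flows meeting =>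
      if meeting ≠ "" then grouped_flows ++ [(pvBuckets sign_flows "meeting").getD meeting []]
      else grouped_flows ++
        (PySem.List.sorted (pvBuckets ((pvBuckets sign_flows "meeting").getD "" []) "decision_activity").keys (fun k => k) false).map
          (fun a => (pvBuckets ((pvBuckets sign_flows "meeting").getD "" []) "decision_activity").getD a []))
    []

-- ===== PRECONDITION & SPEC =====
def Spec_group_by_meeting_or_decision_activity (sign_flows : List (List (String × String))) (out : List (List (List (String × String)))) : Prop := out = group_by_meeting_or_decision_activity_alt sign_flows
instance (sign_flows : List (List (String × String))) (out : List (List (List (String × String)))) : Decidable (Spec_group_by_meeting_or_decision_activity sign_flows out) := by unfold Spec_group_by_meeting_or_decision_activity; infer_instance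

-- ===== CLAIM (what is proved, stated in full; the proofs are below) =====
def Claim_equal_group_by_meeting_or_decision_activity : Prop := ∀ (sign_flows : List (List (String × String))), Dom_group_by_meeting_or_decision_activity sign_flows → Spec_group_by_meeting_or_decision_activity sign_flows (group_by_meeting_or_decision_activity sign_flows)

-- ===== LEMMAS AND PROOFS =====

-- the ascending list of distinct elements of l (= sorted(set(l)))
def skeys (l : List String) : List String :=
  PySem.List.sorted (PySem.Set.ofList l) (fun k => k) false

-- bucket of key k: the elements of xs keyed k, in original order
def groupsOf {α : Type} (key : α → String) (xs : List α) : String → List α :=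
  fun k => xs.filter (fun d => key d == k)

theorem skeys_pairwise (l : List String) : (skeys l).Pairwise (· < ·) := by
  exact PySem.List.sorted_ofList_pairwise_lt l

theorem skeys_mem (l : List String) (k : String) : k ∈ skeys l ↔ k ∈ l := by
  simp [skeys, PySem.List.mem_sorted, PySem.Set.mem_ofList]

theorem insertBy_cons {α : Type} (before : α → α → Bool) (x y : α) (ys : List α) :
    PySem.List.insertBy before x (y :: ys) =
      if before x y then x :: y :: ys else y :: PySem.List.insertBy before x ys := by
  rfl

theorem insertBy_all {α : Type} (before : α → α → Bool) (x : α) (L : List α)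
    (h : ∀ y ∈ L, before x y = true) : PySem.List.insertBy before x L = x :: L := by
  cases L with
  | nil => rfl
  | cons y ys => rw [insertBy_cons, h y (by simp)]; rfl

theorem insertBy_pass {α : Type} (before : α → α → Bool) (x : α) (L1 L2 : List α)
    (h : ∀ y ∈ L1, before x y = false) :
    PySem.List.insertBy before x (L1 ++ L2) = L1 ++ PySem.List.insertBy before x L2 := by
  induction L1 with
  | nil => rfl
  | cons y ys ih =>
    rw [List.cons_append, insertBy_cons, h y (by simp)]
    rw [ih (fun z hz => h z (by simp [hz]))]
    simp

theorem flatMap_congr' {α β : Type} (l : List α) (f g : α → List β)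
    (h : ∀ a ∈ l, f a = g a) : l.flatMap f = l.flatMap g := by
  induction l with
  | nil => rfl
  | cons a l ih =>
    simp only [List.flatMap_cons]
    rw [h a (by simp), ih]
    intro b hb; exact h b (by simp [hb])

-- inserting x (key c) into grouped form, c already a group key
theorem ins_mem {α : Type} (key : α → String) (K : List String) (F : String → List α)
    (c : String) (x : α) (hK : K.Pairwise (· < ·))
    (hF : ∀ k, ∀ y ∈ F k, key y = k) (hx : key x = c) (hc : c ∈ K) :
    PySem.List.insertBy (fun a b => decide (key a < key b)) x (K.flatMap F) =
      K.flatMap (fun k => F k ++ if c == k then [x] else []) := by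
  induction K with
  | nil => cases hc
  | cons k K' ih =>
    have hlt : ∀ k' ∈ K', k < k' := (List.pairwise_cons.mp hK).1
    simp only [List.flatMap_cons]
    by_cases hck : c = k
    · subst hck
      rw [insertBy_pass _ _ _ _ (fun y hy => by rw [hF c y hy, hx]; simp),
          insertBy_all _ _ _ (fun y hy => by
            obtain ⟨k', hk', hy'⟩ := List.mem_flatMap.mp hy
            rw [hF k' y hy', hx]; simp [hlt k' hk']),
          flatMap_congr' K' (fun k => F k ++ if c == k then [x] else []) F
            (fun k' hk' => by simp [(ne_of_lt (hlt k' hk'))])]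
      simp
    · have hc' : c ∈ K' := by
        rcases List.mem_cons.mp hc with h | h
        · exact absurd h hck
        · exact h
      rw [insertBy_pass _ _ _ _ (fun y hy => by
            rw [hF k y hy, hx]
            simp [not_lt.mpr (le_of_lt (hlt c hc'))]),
          ih (List.pairwise_cons.mp hK).2 hc']
      simp [hck]

-- inserting x (fresh key c) into grouped form
theorem ins_not_mem {α : Type} (key : α → String) (K : List String) (F : String → List α)
    (c : String) (x : α) (hK : K.Pairwise (· < ·))
    (hF : ∀ k, ∀ y ∈ F k, key y = k) (hx : key x = c) (hc : c ∉ K) (hFc : F c = []) :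
    PySem.List.insertBy (fun a b => decide (key a < key b)) x (K.flatMap F) =
      (PySem.List.insertBy (fun a b => decide (a < b)) c K).flatMap
        (fun k => F k ++ if c == k then [x] else []) := by
  induction K with
  | nil =>
    show PySem.List.insertBy _ x [] = _
    show [x] = _
    rw [show PySem.List.insertBy (fun a b => decide (a < b)) c [] = [c] from rfl,
        List.flatMap_cons]
    simp [hFc]
  | cons k K' ih =>
    have hck : c ≠ k := fun h => hc (h ▸ List.mem_cons_self ..)
    have hc' : c ∉ K' := fun h => hc (List.mem_cons_of_mem _ h)
    have hlt : ∀ k' ∈ K', k < k' := (List.pairwise_cons.mp hK).1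
    simp only [List.flatMap_cons]
    by_cases h : c < k
    · rw [insertBy_cons]
      rw [if_pos (by simpa using h)]
      rw [insertBy_all _ _ _ (fun y hy => by
        rcases List.mem_append.mp hy with hy | hy
        · rw [hF k y hy, hx]; simp [h]
        · obtain ⟨k', hk', hy'⟩ := List.mem_flatMap.mp hy
          rw [hF k' y hy', hx]; simp [lt_trans h (hlt k' hk')])]
      rw [List.flatMap_cons, List.flatMap_cons,
          flatMap_congr' K' (fun k => F k ++ if c == k then [x] else []) F
            (fun k' hk' => by simp [(ne_of_lt (lt_trans h (hlt k' hk')))])]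
      simp [hFc, ne_of_lt h]
    · have hkc : k < c := lt_of_le_of_ne (not_lt.mp h) (Ne.symm hck)
      rw [insertBy_cons]
      rw [if_neg (by simpa using h)]
      rw [insertBy_pass _ _ _ _ (fun y hy => by
            rw [hF k y hy, hx]; simp [h]),
          ih (List.pairwise_cons.mp hK).2 hc']
      rw [List.flatMap_cons]
      simp [hck]

theorem sorted_append_singleton {α : Type} (key : α → String) (xs : List α) (x : α) :
    PySem.List.sorted (xs ++ [x]) key false =
      PySem.List.insertBy (fun a b => decide (key a < key b)) x (PySem.List.sorted xs key false) := by
  rw [PySem.List.sorted_eq_foldl_insertBy, PySem.List.sorted_eq_foldl_insertBy, List.foldl_append]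
  rfl

theorem skeys_append_mem (l : List String) (c : String) (h : c ∈ l) :
    skeys (l ++ [c]) = skeys l := by
  unfold skeys
  congr 1
  rw [PySem.Set.ofList_eq_foldl, List.foldl_append, ← PySem.Set.ofList_eq_foldl]
  show PySem.Set.add _ c = _
  rw [PySem.Set.add, if_pos]
  simpa [PySem.Set.contains] using (PySem.Set.mem_ofList l c).mpr h

theorem skeys_append_not_mem (l : List String) (c : String) (h : c ∉ l) :
    skeys (l ++ [c]) = PySem.List.insertBy (fun a b => decide (a < b)) c (skeys l) := by
  have : PySem.Set.ofList (l ++ [c]) = PySem.Set.ofList l ++ [c] := by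
    rw [PySem.Set.ofList_eq_foldl, List.foldl_append, ← PySem.Set.ofList_eq_foldl]
    show PySem.Set.add _ c = _
    rw [PySem.Set.add, if_neg]
    simpa [PySem.Set.contains] using fun hh => h ((PySem.Set.mem_ofList l c).mp hh)
  unfold skeys
  rw [this, sorted_append_singleton]

-- CRUX: Python's stable sort by key is the concatenation of the original-order buckets
-- taken in ascending key order
theorem crux {α : Type} (key : α → String) (xs : List α) :
    PySem.List.sorted xs key false = (skeys (xs.map key)).flatMap (groupsOf key xs) := by
  induction xs using List.reverseRecOn with
  | nil => rfl
  | append_singleton xs x ih =>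
    rw [sorted_append_singleton, ih, List.map_append]
    simp only [List.map_cons, List.map_nil]
    have hF : ∀ k, ∀ y ∈ groupsOf key xs k, key y = k := fun k y hy => by
      have h' : y ∈ xs.filter (fun d => key d == k) := hy
      exact eq_of_beq (List.mem_filter.mp h').2
    by_cases hc : key x ∈ List.map key xs
    · rw [skeys_append_mem _ _ hc,
          ins_mem key (skeys (List.map key xs)) (groupsOf key xs) (key x) x
            (skeys_pairwise _) hF rfl ((skeys_mem _ _).mpr hc)]
      exact flatMap_congr' _ _ _ (fun k _ => by
        simp only [groupsOf, List.filter_append]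
        by_cases h : key x = k <;> simp [h])
    · rw [skeys_append_not_mem _ _ hc,
          ins_not_mem key (skeys (List.map key xs)) (groupsOf key xs) (key x) x
            (skeys_pairwise _) hF rfl (fun h => hc ((skeys_mem _ _).mp h))
            (by
              simp only [groupsOf]
              exact List.filter_eq_nil_iff.mpr (fun y hy => by
                intro hb
                exact hc (eq_of_beq hb ▸ List.mem_map_of_mem hy)))]
      exact flatMap_congr' _ _ _ (fun k _ => by
        simp only [groupsOf, List.filter_append]
        by_cases h : key x = k <;> simp [h])

theorem takeWhile_all_false {α : Type} (p : α → Bool) (L : List α)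
    (h : ∀ y ∈ L, p y = false) : L.takeWhile p = [] := by
  cases L with
  | nil => rfl
  | cons y ys => simp [h y (by simp)]

theorem dropWhile_all_false {α : Type} (p : α → Bool) (L : List α)
    (h : ∀ y ∈ L, p y = false) : L.dropWhile p = L := by
  cases L with
  | nil => rfl
  | cons y ys => simp [h y (by simp)]

theorem takeWhile_append_true {α : Type} (p : α → Bool) (L1 L2 : List α)
    (h : ∀ y ∈ L1, p y = true) : (L1 ++ L2).takeWhile p = L1 ++ L2.takeWhile p := by
  induction L1 with
  | nil => rfl
  | cons y ys ih =>
    simp only [List.cons_append, List.takeWhile_cons, h y (by simp)]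
    rw [ih]
    · simp
    · intro z hz; exact h z (by simp [hz])

theorem dropWhile_append_true {α : Type} (p : α → Bool) (L1 L2 : List α)
    (h : ∀ y ∈ L1, p y = true) : (L1 ++ L2).dropWhile p = L2.dropWhile p := by
  induction L1 with
  | nil => rfl
  | cons y ys ih =>
    simp only [List.cons_append, List.dropWhile_cons, h y (by simp)]
    rw [if_pos trivial, ih (fun z hz => h z (by simp [hz]))]

-- groupby of a key-grouped concatenation reads off the groups
theorem groupby_flat {α : Type} (key : α → String) (K : List String) (F : String → List α)
    (hK : K.Pairwise (· < ·)) (hF : ∀ k ∈ K, ∀ y ∈ F k, key y = k)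
    (hne : ∀ k ∈ K, F k ≠ []) :
    pvGroupby key (K.flatMap F) = K.map (fun k => (k, F k)) := by
  induction K with
  | nil => rw [List.flatMap_nil, pvGroupby]; rfl
  | cons k K' ih =>
    have hlt : ∀ k' ∈ K', k < k' := (List.pairwise_cons.mp hK).1
    have hFk : ∀ y ∈ F k, key y = k := hF k (List.mem_cons_self ..)
    have hrest : ∀ z ∈ K'.flatMap F, (key z == k) = false := by
      intro z hz
      obtain ⟨k', hk', hz'⟩ := List.mem_flatMap.mp hz
      simp [hF k' (List.mem_cons_of_mem _ hk') z hz', (ne_of_lt (hlt k' hk')).symm]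
    cases h : F k with
    | nil => exact absurd h (hne k (List.mem_cons_self ..))
    | cons y ys =>
      have hky : key y = k := hFk y (h ▸ List.mem_cons_self ..)
      simp only [List.flatMap_cons, h, List.cons_append]
      rw [pvGroupby, hky]
      rw [takeWhile_append_true _ _ _ (fun z hz => by
            simp [hFk z (h ▸ List.mem_cons_of_mem _ hz)]),
          takeWhile_all_false _ _ hrest,
          dropWhile_append_true _ _ _ (fun z hz => by
            simp [hFk z (h ▸ List.mem_cons_of_mem _ hz)]),
          dropWhile_all_false _ _ hrest,
          ih (List.pairwise_cons.mp hK).2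
            (fun k' hk' => hF k' (List.mem_cons_of_mem _ hk'))
            (fun k' hk' => hne k' (List.mem_cons_of_mem _ hk'))]
      simp [h]

-- A's sort+groupby, in closed form
theorem groupby_sorted {α : Type} (key : α → String) (xs : List α) :
    pvGroupby key (PySem.List.sorted xs key false) =
      (skeys (xs.map key)).map (fun k => (k, groupsOf key xs k)) := by
  rw [crux]
  refine groupby_flat key _ _ (skeys_pairwise _)
    (fun k _ y hy => eq_of_beq (List.mem_filter.mp hy).2) (fun k hk => ?_)
  obtain ⟨d, hd, hkd⟩ := List.mem_map.mp ((skeys_mem _ _).mp hk)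
  exact List.ne_nil_of_mem (List.mem_filter.mpr ⟨hd, by simp [hkd]⟩)

theorem pvBuckets_keys (flows : List (List (String × String))) (attr : String) :
    (pvBuckets flows attr).keys = PySem.Set.ofList (flows.map (fun d => pvGet d attr)) := by
  unfold pvBuckets
  rw [PySem.Dict.keys_foldl_modify_key flows (fun d => pvGet d attr) []
        (fun _ d => fun g => g ++ [d]) PySem.Dict.empty]
  rfl

theorem pvBuckets_getD (flows : List (List (String × String))) (attr c : String) :
    (pvBuckets flows attr).getD c [] = groupsOf (fun d => pvGet d attr) flows c := by
  unfold pvBuckets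
  rw [show flows.foldl (fun groups d => groups.modify (pvGet d attr) [] (fun g => g ++ [d]))
        PySem.Dict.empty
      = (flows.map (fun d => (pvGet d attr, d))).foldl
          (fun g p => g.modify p.1 [] (fun v => v ++ [p.2])) PySem.Dict.empty from by
        rw [List.foldl_map]]
  rw [PySem.Dict.getD_foldl_modify_append]
  simp [groupsOf, List.filter_map, Function.comp_def]

theorem pv_foldl_if_append {α β : Type} (p : α → Prop) [DecidablePred p] (f g : α → List β) (l : List α) (a : List β) :
    l.foldl (fun acc x => if p x then acc ++ f x else acc ++ g x) a =
      a ++ l.flatMap (fun x => if p x then f x else g x) := by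
  induction l generalizing a with
  | nil => simp
  | cons x l ih =>
    simp only [List.foldl_cons, List.flatMap_cons, ih]
    by_cases hp : p x <;> simp [hp]

theorem pv_foldl_pairs {γ β : Type} (K : List String) (G : String → γ)
    (f g : String × γ → List β) (a : List β) :
    (K.map (fun k => (k, G k))).foldl
        (fun acc mg => if mg.1 ≠ "" then acc ++ f mg else acc ++ g mg) a
      = a ++ K.flatMap (fun k => if k ≠ "" then f (k, G k) else g (k, G k)) := by
  induction K generalizing a with
  | nil => simp
  | cons k K ih =>
    simp only [List.map_cons, List.foldl_cons, List.flatMap_cons, ih]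
    by_cases h : k ≠ "" <;> simp [h]

-- ===== VERDICT (by name: the statement is the Claim_ definition above) =====
theorem group_by_meeting_or_decision_activity_spec : Claim_equal_group_by_meeting_or_decision_activity := by
  intro sign_flows _hdom
  unfold Spec_group_by_meeting_or_decision_activity
  unfold group_by_meeting_or_decision_activity group_by_meeting_or_decision_activity_alt
  rw [groupby_sorted, pv_foldl_pairs, pvBuckets_keys sign_flows "meeting",
      show PySem.List.sorted
          (PySem.Set.ofList (sign_flows.map (fun d => pvGet d "meeting"))) (fun k => k) false
        = skeys (sign_flows.map (fun d => pvGet d "meeting")) from rfl,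
      pv_foldl_if_append]
  simp only [List.nil_append]
  refine flatMap_congr' _ _ _ (fun k _ => ?_)
  by_cases h : k ≠ ""
  · simp only [if_pos h]
    rw [pvBuckets_getD]
  · simp only [if_neg h]
    have hk : k = "" := not_not.mp h
    subst hk
    rw [groupby_sorted, List.map_map, pvBuckets_getD sign_flows "meeting" "",
        pvBuckets_keys (groupsOf (fun d => pvGet d "meeting") sign_flows "") "decision_activity",
        show PySem.List.sorted
            (PySem.Set.ofList ((groupsOf (fun d => pvGet d "meeting") sign_flows "").map
              (fun d => pvGet d "decision_activity"))) (fun k => k) false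
          = skeys ((groupsOf (fun d => pvGet d "meeting") sign_flows "").map
              (fun d => pvGet d "decision_activity")) from rfl]
    simp [pvBuckets_getD, Function.comp_def]
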